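-- pv_equiv track=rewrite | github.com/Abdulla-alk/Predicate-and-First-Order-Tableaux | tableau.py | replace_variable_with_constant
-- ===== SOURCE A (Python) =====
-- def replace_variable_with_constant(formula, variable, constant):
--     result = []
--     i = 0
--     while i < len(formula):
--         # Detect a quantifier (e.g., Ex or Ax)
--         if formula[i:i+2] in [f"E{variable}", f"A{variable}"]:
--             result.append(formula[i:i+2])  # Keep the quantifier unchanged
--             i += 2
--         # Replace the variable inside predicates
--         elif formula[i] == variable:
--             # Ensure we're replacing a standalone variable (not part of a quantifier)
--             if ((i > 0 and formula[i-1] in "(),") or (i < len(formula) - 1 and formula[i+1] in "(),")) and is_free_variable(formula,i):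
--                 result.append(constant)
--             else:
--                 result.append(variable)
--             i += 1
--         else:
--             result.append(formula[i])
--             i += 1
--     return "".join(result)
--
-- def is_free_variable(formula, index):
--     var = formula[index]
--     if var not in {'x', 'y', 'z', 'w'}:
--         return False  # The character at index is not a variable
--
--     var_stack = []      # Stack to track quantifiers for the target variable
--     scope_stack = []    # Stack to track scopes introduced by '(' and quantifiers
--
--     i = 0
--     while i < len(formula):
--         # Handle quantifiers: 'Ex' or 'Ax' for the target variable
--         if i < len(formula) - 1 and formula[i] in {'E', 'A'} and formula[i+1] == var:
--             var_stack.append(var)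
--             scope_stack.append(var)  # Mark that this scope has a quantifier for 'var'
--             i += 2
--             continue
--         # Handle quantifiers for other variables: skip them
--         elif i < len(formula) - 1 and formula[i] in {'E', 'A'} and formula[i+1] != var:
--             # Quantifier for another variable, ignore it
--             i += 2
--             continue
--         elif formula[i] == '(':
--             scope_stack.append('scope')  # General scope marker
--             i += 1
--             continue
--         # Handle closing parenthesis ')'
--         elif formula[i] == ')':
--             if scope_stack:
--                 last_scope = scope_stack.pop()
--                 if last_scope == var:
--                     if var_stack:
--                         var_stack.pop()
--             i += 1
--             continue
--         else:
--             # If current position is the target index and it's the variable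
--             if i == index and formula[i] == var:
--                 # If var_stack is empty, the variable is free
--                 return len(var_stack) == 0
--             i += 1  # Move to the next character
--
--     return False  # Variable not found or not free
-- ===== SOURCE B (Python) =====
-- def _free_positions(formula, variable):
--     # One incremental left-to-right scan of the quantifier scopes: returns the set
--     # of positions holding a free occurrence of `variable`.
--     free = set()
--     st = []          # True marks a scope opened by a quantifier over `variable`
--     q = 0            # number of enclosing quantifiers over `variable`
--     i = 0
--     n = len(formula)
--     while i < n:
--         c = formula[i]
--         if i < n - 1 and (c == 'E' or c == 'A'):
--             if formula[i + 1] == variable: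
--                 st.append(True)
--                 q += 1
--             i += 2
--         elif c == '(':
--             st.append(False)
--             i += 1
--         elif c == ')':
--             if st and st.pop() and q > 0:
--                 q -= 1
--             i += 1
--         else:
--             if c == variable and q == 0:
--                 free.add(i)
--             i += 1
--     return free
--
--
-- def replace_variable_with_constant(formula, variable, constant):
--     free = _free_positions(formula, variable) if variable in ('x', 'y', 'z', 'w') else set()
--     out = []
--     prev = None
--     i = 0
--     n = len(formula)
--     while i < n:
--         c = formula[i]
--         if (c == 'E' or c == 'A') and formula[i + 1:i + 2] == variable:
--             out.append(c)
--             if i + 1 < n: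
--                 out.append(formula[i + 1])
--                 prev = formula[i + 1]
--             i += 2
--         elif c == variable:
--             if ((prev is not None and prev in "(),") or
--                     (i + 1 < n and formula[i + 1] in "(),")) and i in free:
--                 out.append(constant)
--             else:
--                 out.append(variable)
--             prev = c
--             i += 1
--         else:
--             out.append(c)
--             prev = c
--             i += 1
--     return "".join(out)
-- ===== Notes on version B (the rewrite author's own statement) =====
-- stated objective: faster
-- what changed: A re-scans the whole formula from position 0 (is_free_variable) for every candidate variable occurrence; B does one incremental left-to-right scan of the quantifier-scope stack that precomputes the set of free positions, then a prev-char tracking rewrite pass uses that set.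
import Mathlib
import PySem

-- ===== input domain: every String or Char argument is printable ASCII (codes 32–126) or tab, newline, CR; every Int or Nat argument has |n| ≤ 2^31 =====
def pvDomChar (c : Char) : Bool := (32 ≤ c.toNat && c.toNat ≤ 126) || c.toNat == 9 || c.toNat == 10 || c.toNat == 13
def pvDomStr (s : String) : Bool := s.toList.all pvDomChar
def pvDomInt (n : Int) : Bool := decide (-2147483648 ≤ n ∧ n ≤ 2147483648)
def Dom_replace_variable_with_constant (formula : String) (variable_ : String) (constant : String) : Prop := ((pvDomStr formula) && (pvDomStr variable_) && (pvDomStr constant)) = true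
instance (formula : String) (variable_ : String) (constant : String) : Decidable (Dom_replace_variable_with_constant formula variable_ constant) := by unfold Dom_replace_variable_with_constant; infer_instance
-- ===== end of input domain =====

-- B replaces A's per-occurrence rescans of the formula (is_free_variable) by ONE incremental
-- left-to-right scan precomputing the set of free positions, then a prev-char tracking rewrite
-- pass over the character list (objective: faster).

-- ===== PORT A =====
-- the while-loop of Python's is_free_variable; var_stack holds chars, scope_stack holds
-- `some var` (quantifier scope) or `none` (the 'scope' marker pushed for '(');
-- fuel = len(formula): each iteration advances i by ≥ 1, so fuel never runs out early
def isFreeAuxA (l : List Char) (var : Char) (index : Nat) : Nat → Nat → List Char → List (Option Char) → Bool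
  | 0, _, _, _ => false
  | fuel + 1, i, varStack, scopeStack =>
    if i < l.length then
      if i < l.length - 1 ∧ (l.getD i ' ' = 'E' ∨ l.getD i ' ' = 'A') ∧ l.getD (i+1) ' ' = var then
        isFreeAuxA l var index fuel (i+2) (var :: varStack) (some var :: scopeStack)
      else if i < l.length - 1 ∧ (l.getD i ' ' = 'E' ∨ l.getD i ' ' = 'A') ∧ l.getD (i+1) ' ' ≠ var then
        isFreeAuxA l var index fuel (i+2) varStack scopeStack
      else if l.getD i ' ' = '(' then
        isFreeAuxA l var index fuel (i+1) varStack (none :: scopeStack)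
      else if l.getD i ' ' = ')' then
        match scopeStack with
        | [] => isFreeAuxA l var index fuel (i+1) varStack []
        | top :: rest =>
          if top = some var then
            -- Python pops var_stack only if non-empty; List.tail of [] is []
            isFreeAuxA l var index fuel (i+1) varStack.tail rest
          else
            isFreeAuxA l var index fuel (i+1) varStack rest
      else
        if i = index ∧ l.getD i ' ' = var then
          decide (varStack.length = 0)
        else
          isFreeAuxA l var index fuel (i+1) varStack scopeStack
    else false

-- Python's is_free_variable(formula, index), over formula.toList
def is_free_variable_l (l : List Char) (index : Nat) : Bool :=
  let var := l.getD index ' '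
  if var = 'x' ∨ var = 'y' ∨ var = 'z' ∨ var = 'w' then
    isFreeAuxA l var index l.length 0 [] []
  else false

-- main while loop of A; result = list of the appended string pieces (as char lists)
def replaceAuxA (l varL cL : List Char) : Nat → Nat → List (List Char) → List (List Char)
  | 0, _, acc => acc
  | fuel + 1, i, acc =>
    if i < l.length then
      -- formula[i:i+2] = (l.drop i).take 2 for a Nat index
      if (l.drop i).take 2 = 'E' :: varL ∨ (l.drop i).take 2 = 'A' :: varL then
        replaceAuxA l varL cL fuel (i+2) (acc ++ [(l.drop i).take 2])
      else if [l.getD i ' '] = varL then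
        if ((0 < i ∧ l.getD (i-1) ' ' ∈ ['(', ')', ',']) ∨
            (i < l.length - 1 ∧ l.getD (i+1) ' ' ∈ ['(', ')', ','])) ∧ is_free_variable_l l i then
          replaceAuxA l varL cL fuel (i+1) (acc ++ [cL])
        else
          replaceAuxA l varL cL fuel (i+1) (acc ++ [varL])
      else
        replaceAuxA l varL cL fuel (i+1) (acc ++ [[l.getD i ' ']])
    else acc

def replace_variable_with_constant (formula : String) (variable_ : String) (constant : String) : String :=
  String.ofList (replaceAuxA formula.toList variable_.toList constant.toList formula.toList.length 0 []).flatten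

-- ===== PORT B =====
-- one elementary step of B's scope scan on a non-quantifier character
def scanStepB (var c : Char) (pos : Nat) (st : List Bool) (q : Nat) (free : List Nat) :
    List Bool × Nat × List Nat :=
  if c = '(' then (false :: st, q, free)
  else if c = ')' then
    match st with
    | [] => ([], q, free)
    | b :: s' => (s', if b ∧ 0 < q then q - 1 else q, free)
  else if c = var ∧ q = 0 then (st, q, PySem.Set.add free pos)
  else (st, q, free)

-- B's single incremental scan (Python _free_positions), structural on the char list:
-- st: True = scope of a quantifier over var; q = enclosing quantifiers over var
def scanB (var : Char) : Nat → List Bool → Nat → List Nat → List Char → List Nat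
  | _, _, _, free, [] => free
  | pos, st, q, free, [c] =>
    match scanStepB var c pos st q free with
    | (st', q', free') => scanB var (pos + 1) st' q' free' []
  | pos, st, q, free, c :: d :: rest =>
    if c = 'E' ∨ c = 'A' then
      if d = var then scanB var (pos + 2) (true :: st) (q + 1) free rest
      else scanB var (pos + 2) st q free rest
    else
      match scanStepB var c pos st q free with
      | (st', q', free') => scanB var (pos + 1) st' q' free' (d :: rest)

def prevPunctB : Option Char → Bool
  | some p => ['(', ')', ','].contains p
  | none => false

-- B's rewrite pass: recursion on the remaining characters, tracking the previous character
def rewriteB (varL cL : List Char) (free : List Nat) : Option Char → Nat → List Char → List Char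
  | _, _, [] => []
  | prev, pos, c :: rest =>
    if (c = 'E' ∨ c = 'A') ∧ rest.take 1 = varL then
      match rest with
      | [] => [c]
      | d :: rest' => c :: d :: rewriteB varL cL free (some d) (pos + 2) rest'
    else if [c] = varL then
      (if ((prevPunctB prev = true) ∨ (rest ≠ [] ∧ rest.headD ' ' ∈ ['(', ')', ','])) ∧
          PySem.Set.contains free pos = true
       then cL else varL) ++ rewriteB varL cL free (some c) (pos + 1) rest
    else c :: rewriteB varL cL free (some c) (pos + 1) rest

def replace_variable_with_constant_alt (formula : String) (variable_ : String) (constant : String) : String :=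
  let l := formula.toList
  let varL := variable_.toList
  -- variable in ('x','y','z','w'): string equality, via the char lists (exact)
  let free : List Nat :=
    if varL = ['x'] ∨ varL = ['y'] ∨ varL = ['z'] ∨ varL = ['w'] then
      scanB (varL.getD 0 ' ') 0 [] 0 [] l
    else []
  String.ofList (rewriteB varL constant.toList free none 0 l)

-- ===== PRECONDITION & SPEC =====
def Spec_replace_variable_with_constant (formula : String) (variable_ : String) (constant : String) (out : String) : Prop := out = replace_variable_with_constant_alt formula variable_ constant
instance (formula : String) (variable_ : String) (constant : String) (out : String) : Decidable (Spec_replace_variable_with_constant formula variable_ constant out) := by unfold Spec_replace_variable_with_constant; infer_instance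

-- ===== CLAIM (what is proved, stated in full; the proofs are below) =====
def Claim_equal_replace_variable_with_constant : Prop := ∀ (formula : String) (variable_ : String) (constant : String), Dom_replace_variable_with_constant formula variable_ constant → Spec_replace_variable_with_constant formula variable_ constant (replace_variable_with_constant formula variable_ constant)

-- ===== LEMMAS AND PROOFS =====

-- one-step equations of scanB over a drop-suffix of l
theorem scanB_step (l : List Char) (var : Char) (i : Nat) (st : List Bool) (q : Nat)
    (free : List Nat) (hi : i < l.length)
    (hEA : ¬(i < l.length - 1 ∧ (l.getD i ' ' = 'E' ∨ l.getD i ' ' = 'A'))) :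
    scanB var i st q free (l.drop i) =
      (match scanStepB var (l.getD i ' ') i st q free with
       | (st', q', free') => scanB var (i + 1) st' q' free' (l.drop (i + 1))) := by
  have hc : l.drop i = l.getD i ' ' :: l.drop (i + 1) := by
    rw [List.drop_eq_getElem_cons hi, List.getD_eq_getElem _ _ hi]
  by_cases h1 : i + 1 < l.length
  · have hc2 : l.drop (i + 1) = l.getD (i + 1) ' ' :: l.drop (i + 2) := by
      rw [List.drop_eq_getElem_cons h1, List.getD_eq_getElem _ _ h1]
    have hne : ¬(l.getD i ' ' = 'E' ∨ l.getD i ' ' = 'A') := fun h => hEA ⟨by omega, h⟩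
    rw [hc, hc2, scanB, if_neg hne, ← hc2]
  · have h2 : l.drop (i + 1) = [] := List.drop_eq_nil_of_le (by omega)
    rw [hc, h2, scanB]

theorem scanB_stepEA (l : List Char) (var : Char) (i : Nat) (st : List Bool) (q : Nat)
    (free : List Nat) (hi : i + 1 < l.length)
    (hEA : l.getD i ' ' = 'E' ∨ l.getD i ' ' = 'A') :
    scanB var i st q free (l.drop i) =
      (if l.getD (i + 1) ' ' = var then scanB var (i + 2) (true :: st) (q + 1) free (l.drop (i + 2))
       else scanB var (i + 2) st q free (l.drop (i + 2))) := by
  have hc : l.drop i = l.getD i ' ' :: l.drop (i + 1) := by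
    rw [List.drop_eq_getElem_cons (by omega), List.getD_eq_getElem _ _ (by omega)]
  have hc2 : l.drop (i + 1) = l.getD (i + 1) ' ' :: l.drop (i + 2) := by
    rw [List.drop_eq_getElem_cons hi, List.getD_eq_getElem _ _ hi]
  rw [hc, hc2, scanB, if_pos hEA]

-- the free-set component of one scan step: unchanged, or the current position added
theorem scanStepB_free (var c : Char) (pos : Nat) (st : List Bool) (q : Nat) (free : List Nat) :
    (scanStepB var c pos st q free).2.2 = free ∨
      (scanStepB var c pos st q free).2.2 = PySem.Set.add free pos := by
  unfold scanStepB
  split_ifs with h1 h2 h3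
  · exact Or.inl rfl
  · cases st <;> exact Or.inl rfl
  · exact Or.inr rfl
  · exact Or.inl rfl

-- anything the scan (run on a suffix of l with enough fuel) adds lies at a position ≥ the current one
theorem scanB_mem_ge (l : List Char) (var : Char) :
    ∀ (fuel i : Nat) (st : List Bool) (q : Nat) (free : List Nat) (j : Nat),
      l.length ≤ i + fuel → j ∈ scanB var i st q free (l.drop i) → j ∈ free ∨ i ≤ j := by
  intro fuel
  induction fuel with
  | zero =>
    intro i st q free j hf hmem
    rw [List.drop_eq_nil_of_le (by omega)] at hmem
    exact Or.inl hmem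
  | succ k ih =>
    intro i st q free j hf hmem
    by_cases hi : i < l.length
    · by_cases hEA : i < l.length - 1 ∧ (l.getD i ' ' = 'E' ∨ l.getD i ' ' = 'A')
      · rw [scanB_stepEA l var i st q free (by omega) hEA.2] at hmem
        split_ifs at hmem with hv
        · rcases ih (i+2) _ _ _ j (by omega) hmem with h | h
          · exact Or.inl h
          · exact Or.inr (by omega)
        · rcases ih (i+2) _ _ _ j (by omega) hmem with h | h
          · exact Or.inl h
          · exact Or.inr (by omega)
      · rw [scanB_step l var i st q free hi hEA] at hmem
        rcases hsp : scanStepB var (l.getD i ' ') i st q free with ⟨st', q', free'⟩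
        rw [hsp] at hmem
        rcases ih (i+1) st' q' free' j (by omega) hmem with h | h
        · have hfe := scanStepB_free var (l.getD i ' ') i st q free
          rw [hsp] at hfe
          rcases hfe with he | he <;> simp only at he <;> rw [he] at h
          · exact Or.inl h
          · rcases (PySem.Set.mem_add _ _ _).1 h with h' | h'
            · exact Or.inl h'
            · exact Or.inr (by omega)
        · exact Or.inr (by omega)
    · rw [List.drop_eq_nil_of_le (by omega)] at hmem
      exact Or.inl hmem

-- the scan never drops elements of the accumulated set
theorem scanB_mem_mono (l : List Char) (var : Char) :
    ∀ (fuel i : Nat) (st : List Bool) (q : Nat) (free : List Nat) (j : Nat),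
      l.length ≤ i + fuel → j ∈ free → j ∈ scanB var i st q free (l.drop i) := by
  intro fuel
  induction fuel with
  | zero =>
    intro i st q free j hf hmem
    rw [List.drop_eq_nil_of_le (by omega)]
    exact hmem
  | succ k ih =>
    intro i st q free j hf hmem
    by_cases hi : i < l.length
    · by_cases hEA : i < l.length - 1 ∧ (l.getD i ' ' = 'E' ∨ l.getD i ' ' = 'A')
      · rw [scanB_stepEA l var i st q free (by omega) hEA.2]
        split_ifs with hv
        · exact ih (i+2) _ _ _ j (by omega) hmem
        · exact ih (i+2) _ _ _ j (by omega) hmem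
      · rw [scanB_step l var i st q free hi hEA]
        rcases hsp : scanStepB var (l.getD i ' ') i st q free with ⟨st', q', free'⟩
        refine ih (i+1) st' q' free' j (by omega) ?_
        have hfe := scanStepB_free var (l.getD i ' ') i st q free
        rw [hsp] at hfe
        rcases hfe with he | he <;> simp only at he <;> rw [he]
        · exact hmem
        · exact (PySem.Set.mem_add _ _ _).2 (Or.inl hmem)
    · rw [List.drop_eq_nil_of_le (by omega)]
      exact hmem

-- KEY: A's per-position rescan agrees with membership in B's one-pass free set,
-- whenever the two scan states correspond (st = image of scope_stack, q = |var_stack|)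
theorem isFree_iff_mem_scanB (l : List Char) (var : Char) (index : Nat) :
    ∀ (fuel i : Nat) (vs : List Char) (ss : List (Option Char)) (free : List Nat),
      l.length ≤ i + fuel → index ∉ free →
      (isFreeAuxA l var index fuel i vs ss = true ↔
        index ∈ scanB var i (ss.map (fun o => decide (o = some var))) vs.length free (l.drop i)) := by
  intro fuel
  induction fuel with
  | zero =>
    intro i vs ss free hf hnot
    rw [List.drop_eq_nil_of_le (by omega)]
    simp [isFreeAuxA, scanB, hnot]
  | succ k ih =>
    intro i vs ss free hf hnot
    rw [isFreeAuxA.eq_def]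
    dsimp only
    by_cases hi : i < l.length
    · rw [if_pos hi]
      by_cases h1 : i < l.length - 1 ∧ (l.getD i ' ' = 'E' ∨ l.getD i ' ' = 'A') ∧ l.getD (i+1) ' ' = var
      · rw [if_pos h1, scanB_stepEA l var i _ _ _ (by omega) h1.2.1, if_pos h1.2.2]
        simpa using ih (i+2) (var :: vs) (some var :: ss) free (by omega) hnot
      · rw [if_neg h1]
        by_cases h2 : i < l.length - 1 ∧ (l.getD i ' ' = 'E' ∨ l.getD i ' ' = 'A') ∧ l.getD (i+1) ' ' ≠ var
        · rw [if_pos h2, scanB_stepEA l var i _ _ _ (by omega) h2.2.1, if_neg h2.2.2]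
          exact ih (i+2) vs ss free (by omega) hnot
        · have hEA : ¬(i < l.length - 1 ∧ (l.getD i ' ' = 'E' ∨ l.getD i ' ' = 'A')) := by tauto
          rw [if_neg h2, scanB_step l var i _ _ _ hi hEA]
          generalize hg : l.getD i ' ' = c
          by_cases hop : c = '('
          · rw [if_pos hop]
            simpa [scanStepB, hop] using ih (i+1) vs (none :: ss) free (by omega) hnot
          · by_cases hcl : c = ')'
            · rw [if_neg hop, if_pos hcl]
              cases ss with
              | nil =>
                simpa [scanStepB, hop, hcl] using ih (i+1) vs [] free (by omega) hnot
              | cons top rest =>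
                dsimp only
                by_cases htop : top = some var
                · rw [if_pos htop]
                  cases vs with
                  | nil =>
                    simpa [scanStepB, hop, hcl, htop] using
                      ih (i+1) [] rest free (by omega) hnot
                  | cons v vs' =>
                    simpa [scanStepB, hop, hcl, htop] using
                      ih (i+1) vs' rest free (by omega) hnot
                · rw [if_neg htop]
                  simpa [scanStepB, hop, hcl, htop] using ih (i+1) vs rest free (by omega) hnot
            · rw [if_neg hop, if_neg hcl]
              by_cases hidx : i = index ∧ c = var
              · obtain ⟨hii, hc1⟩ := hidx
                subst hc1
                rw [if_pos ⟨hii, rfl⟩]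
                by_cases hq : vs.length = 0
                · have hm : index ∈ PySem.Set.add free i :=
                    (PySem.Set.mem_add _ _ _).2 (Or.inr hii.symm)
                  have hmem := scanB_mem_mono l c k (i+1)
                    (ss.map (fun o => decide (o = some c))) vs.length
                    (PySem.Set.add free i) index (by omega) hm
                  rw [hq] at hmem
                  simp [scanStepB, hop, hcl, hq, hmem]
                · have hnotm : index ∉ scanB c (i+1)
                      (ss.map (fun o => decide (o = some c))) vs.length free
                      (l.drop (i+1)) := by
                    intro h
                    rcases scanB_mem_ge l c k (i+1) _ _ _ index (by omega) h with h' | h'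
                    · exact hnot h'
                    · omega
                  simp [scanStepB, hop, hcl, hq, hnotm]
              · rw [if_neg hidx]
                by_cases hcv : c = var ∧ vs.length = 0
                · obtain ⟨hc1, hq0⟩ := hcv
                  subst hc1
                  have hne : i ≠ index := fun h => hidx ⟨h, rfl⟩
                  have hnot' : index ∉ PySem.Set.add free i := by
                    intro h
                    rcases (PySem.Set.mem_add _ _ _).1 h with h' | h'
                    · exact hnot h'
                    · exact hne h'.symm
                  simpa [scanStepB, hop, hcl, hq0] using
                    ih (i+1) vs ss (PySem.Set.add free i) (by omega) hnot'
                · have hcv' : ¬(c = var ∧ vs = []) := fun h => hcv ⟨h.1, by simp [h.2]⟩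
                  simpa [scanStepB, hop, hcl, hcv'] using ih (i+1) vs ss free (by omega) hnot
    · rw [if_neg hi, List.drop_eq_nil_of_le (by omega), scanB]
      simp [hnot]

-- defining equations of rewriteB, for rewriting
theorem rewriteB_nil (varL cL : List Char) (free : List Nat) (prev : Option Char) (pos : Nat) :
    rewriteB varL cL free prev pos [] = [] := rfl

theorem rewriteB_cons (varL cL : List Char) (free : List Nat) (prev : Option Char) (pos : Nat)
    (c : Char) (rest : List Char) :
    rewriteB varL cL free prev pos (c :: rest) =
      (if (c = 'E' ∨ c = 'A') ∧ rest.take 1 = varL then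
        match rest with
        | [] => [c]
        | d :: rest' => c :: d :: rewriteB varL cL free (some d) (pos + 2) rest'
      else if [c] = varL then
        (if ((prevPunctB prev = true) ∨ (rest ≠ [] ∧ rest.headD ' ' ∈ ['(', ')', ','])) ∧
            PySem.Set.contains free pos = true
         then cL else varL) ++ rewriteB varL cL free (some c) (pos + 1) rest
      else c :: rewriteB varL cL free (some c) (pos + 1) rest) := by
  conv_lhs => rw [rewriteB.eq_def]

-- bridge: A's per-occurrence rescan answer = membership of the position in B's free set
theorem isFree_eq_contains (l varL : List Char) (freeT : List Nat) (i : Nat)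
    (hv : [l.getD i ' '] = varL)
    (hfree : freeT = if varL = ['x'] ∨ varL = ['y'] ∨ varL = ['z'] ∨ varL = ['w'] then
      scanB (varL.getD 0 ' ') 0 [] 0 [] l else []) :
    (is_free_variable_l l i = true ↔ PySem.Set.contains freeT i = true) := by
  have hc : varL.getD 0 ' ' = l.getD i ' ' := by rw [← hv]; rfl
  unfold is_free_variable_l
  by_cases hx : l.getD i ' ' = 'x' ∨ l.getD i ' ' = 'y' ∨ l.getD i ' ' = 'z' ∨ l.getD i ' ' = 'w'
  · have hguard : varL = ['x'] ∨ varL = ['y'] ∨ varL = ['z'] ∨ varL = ['w'] := by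
      rcases hx with h | h | h | h <;> rw [← hv, h] <;> tauto
    rw [if_pos hx, hfree, if_pos hguard, hc]
    have hks := isFree_iff_mem_scanB l (l.getD i ' ') i l.length 0 [] [] [] (by omega) (by simp)
    simp only [List.map_nil, List.length_nil, List.drop_zero] at hks
    rw [hks]
    simp [PySem.Set.contains]
  · have hguard : ¬(varL = ['x'] ∨ varL = ['y'] ∨ varL = ['z'] ∨ varL = ['w']) := by
      intro h
      rcases h with h | h | h | h <;> rw [h] at hv <;> simp_all
    rw [if_neg hx, hfree, if_neg hguard]
    simp [PySem.Set.contains]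

-- the two rewrite passes agree
theorem replaceAux_eq (l varL cL : List Char) (freeT : List Nat)
    (hfree : freeT = if varL = ['x'] ∨ varL = ['y'] ∨ varL = ['z'] ∨ varL = ['w'] then
      scanB (varL.getD 0 ' ') 0 [] 0 [] l else []) :
    ∀ (fuel i : Nat) (acc : List (List Char)), l.length ≤ i + fuel →
      (replaceAuxA l varL cL fuel i acc).flatten =
        acc.flatten ++ rewriteB varL cL freeT
          (if i = 0 then none else some (l.getD (i - 1) ' ')) i (l.drop i) := by
  intro fuel
  induction fuel with
  | zero =>
    intro i acc hf
    rw [List.drop_eq_nil_of_le (by omega), replaceAuxA, rewriteB_nil]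
    simp
  | succ k ih =>
    intro i acc hf
    rw [replaceAuxA.eq_def]
    dsimp only
    by_cases hi : i < l.length
    · rw [if_pos hi]
      have hc : l.drop i = l.getD i ' ' :: l.drop (i + 1) := by
        rw [List.drop_eq_getElem_cons hi, List.getD_eq_getElem _ _ hi]
      by_cases hp : (l.drop i).take 2 = 'E' :: varL ∨ (l.drop i).take 2 = 'A' :: varL
      · rw [if_pos hp]
        have hp' := hp
        rw [hc] at hp'
        simp only [List.take_succ_cons, List.cons.injEq] at hp'
        have hcond : (l.getD i ' ' = 'E' ∨ l.getD i ' ' = 'A') ∧ (l.drop (i+1)).take 1 = varL := by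
          rcases hp' with ⟨h1, h2⟩ | ⟨h1, h2⟩
          · exact ⟨Or.inl h1, h2⟩
          · exact ⟨Or.inr h1, h2⟩
        conv_rhs => rw [hc]
        rw [rewriteB_cons, if_pos hcond]
        cases hrest : l.drop (i+1) with
        | nil =>
          have hlen : l.length ≤ i + 1 := by
            by_contra h
            rw [List.drop_eq_getElem_cons (by omega : i + 1 < l.length)] at hrest
            cases hrest
          have htk : (l.drop i).take 2 = [l.getD i ' '] := by rw [hc, hrest]; rfl
          rw [htk, ih (i+2) (acc ++ [[l.getD i ' ']]) (by omega),
            List.drop_eq_nil_of_le (show l.length ≤ i + 2 by omega), rewriteB_nil]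
          simp
        | cons d rest' =>
          have h1 : i + 1 < l.length := by
            by_contra h
            rw [List.drop_eq_nil_of_le (by omega)] at hrest
            cases hrest
          have hc2 : l.drop (i+1) = l.getD (i+1) ' ' :: l.drop (i+2) := by
            rw [List.drop_eq_getElem_cons h1, List.getD_eq_getElem _ _ h1]
          have hd : d = l.getD (i+1) ' ' := by rw [hc2] at hrest; exact (List.cons.injEq .. ▸ hrest).1.symm
          have hr' : rest' = l.drop (i+2) := by rw [hc2] at hrest; exact (List.cons.injEq .. ▸ hrest).2.symm
          have htk : (l.drop i).take 2 = [l.getD i ' ', d] := by rw [hc, hrest]; rfl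
          rw [htk, ih (i+2) (acc ++ [[l.getD i ' ', d]]) (by omega)]
          have hprev : (if i + 2 = 0 then none else some (l.getD (i + 2 - 1) ' ')) = some d := by
            simp [hd]
          rw [hprev, hr']
          simp
      · rw [if_neg hp]
        have hpB : ¬((l.getD i ' ' = 'E' ∨ l.getD i ' ' = 'A') ∧ (l.drop (i+1)).take 1 = varL) := by
          intro ⟨h1, h2⟩
          apply hp
          rw [hc]
          simp only [List.take_succ_cons, h2]
          rcases h1 with h | h <;> rw [h] <;> tauto
        conv_rhs => rw [hc]
        rw [rewriteB_cons, if_neg hpB]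
        have hprev1 : (if i + 1 = 0 then none else some (l.getD (i + 1 - 1) ' ')) =
            some (l.getD i ' ') := by simp
        by_cases hv : [l.getD i ' '] = varL
        · rw [if_pos hv, if_pos hv]
          have hfreeiff := isFree_eq_contains l varL freeT i hv hfree
          have hprev : (prevPunctB (if i = 0 then none else some (l.getD (i-1) ' ')) = true) ↔
              (0 < i ∧ l.getD (i-1) ' ' ∈ ['(', ')', ',']) := by
            cases i with
            | zero => simp [prevPunctB]
            | succ j => simp [prevPunctB]
          have hnext : (l.drop (i+1) ≠ [] ∧ (l.drop (i+1)).headD ' ' ∈ ['(', ')', ',']) ↔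
              (i < l.length - 1 ∧ l.getD (i+1) ' ' ∈ ['(', ')', ',']) := by
            by_cases h1 : i + 1 < l.length
            · have hc2 : l.drop (i+1) = l.getD (i+1) ' ' :: l.drop (i+2) := by
                rw [List.drop_eq_getElem_cons h1, List.getD_eq_getElem _ _ h1]
              rw [hc2]
              simp only [List.headD_cons, ne_eq, reduceCtorEq, not_false_iff, true_and]
              constructor
              · intro h; exact ⟨by omega, h⟩
              · intro h; exact h.2
            · rw [List.drop_eq_nil_of_le (by omega)]
              constructor
              · intro h; exact absurd rfl h.1
              · intro h; omega
          by_cases hA : ((0 < i ∧ l.getD (i-1) ' ' ∈ ['(', ')', ',']) ∨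
              (i < l.length - 1 ∧ l.getD (i+1) ' ' ∈ ['(', ')', ','])) ∧ is_free_variable_l l i
          · rw [if_pos hA,
              if_pos (show (prevPunctB (if i = 0 then none else some (l.getD (i-1) ' ')) = true ∨
                (l.drop (i+1) ≠ [] ∧ (l.drop (i+1)).headD ' ' ∈ ['(', ')', ','])) ∧
                PySem.Set.contains freeT i = true from
                ⟨hA.1.elim (fun h => Or.inl (hprev.2 h)) (fun h => Or.inr (hnext.2 h)),
                 hfreeiff.1 hA.2⟩),
              ih (i+1) (acc ++ [cL]) (by omega), hprev1]
            simp
          · rw [if_neg hA,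
              if_neg (show ¬((prevPunctB (if i = 0 then none else some (l.getD (i-1) ' ')) = true ∨
                (l.drop (i+1) ≠ [] ∧ (l.drop (i+1)).headD ' ' ∈ ['(', ')', ','])) ∧
                PySem.Set.contains freeT i = true) from
                fun ⟨h1, h2⟩ => hA ⟨h1.elim (fun h => Or.inl (hprev.1 h))
                  (fun h => Or.inr (hnext.1 h)), hfreeiff.2 h2⟩),
              ih (i+1) (acc ++ [varL]) (by omega), hprev1]
            simp
        · rw [if_neg hv, if_neg hv, ih (i+1) (acc ++ [[l.getD i ' ']]) (by omega), hprev1]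
          simp
    · rw [if_neg hi, List.drop_eq_nil_of_le (by omega), rewriteB_nil]
      simp

-- ===== VERDICT (by name: the statement is the Claim_ definition above) =====
theorem replace_variable_with_constant_spec : Claim_equal_replace_variable_with_constant := by
  intro formula variable_ constant _
  unfold Spec_replace_variable_with_constant
  unfold replace_variable_with_constant replace_variable_with_constant_alt
  rw [replaceAux_eq formula.toList variable_.toList constant.toList _ rfl
    formula.toList.length 0 [] (by omega)]
  rfl
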